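-- pv_equiv track=rewrite | github.com/MeetWq/skia-python | split_declarations_and_definitions.py | split_parts
-- ===== SOURCE A (Python) =====
-- def split_parts(content: str):
--     parts = []
--     lines = content.splitlines()
--     start_index = 0
--     is_annotation = False
--     for i, line in enumerate(lines):
--         if line.startswith("/*"):
--             is_annotation = True
--         if line.endswith("*/"):
--             is_annotation = False
--         if (
--             not line.strip()
--             and not is_annotation
--             and (i > start_index and lines[i - 1].endswith((";", "*/")))
--             and (i + 1 >= len(lines) or not lines[i + 1].startswith(" "))
--         ):
--             parts.append("\n".join(lines[start_index:i]))
--             start_index = i + 1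
--     parts.append("\n".join(lines[start_index:]))
--     parts = [part.strip() for part in parts if part.strip()]
--     return parts
-- ===== SOURCE B (Python) =====
-- def split_parts(content: str):
--     def blocks(seg, flag):
--         # peel off the leading block: find the first local cut, slice, recurse on the rest
--         for i, line in enumerate(seg):
--             if line.startswith("/*"):
--                 flag = True
--             if line.endswith("*/"):
--                 flag = False
--             if (i > 0 and not line.strip() and not flag
--                     and seg[i - 1].endswith((";", "*/"))
--                     and (i + 1 >= len(seg) or not seg[i + 1].startswith(" "))):
--                 return ["\n".join(seg[:i])] + blocks(seg[i + 1:], flag)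
--         return ["\n".join(seg)]
--     return [p.strip() for p in blocks(content.splitlines(), False) if p.strip()]
-- ===== Notes on version B (the rewrite author's own statement) =====
-- stated objective: alternative
-- what changed: Replaces A's single stateful scan (threaded start index and parts list accumulated across the whole file) by a recursive splitter that repeatedly finds the first cut in the remaining suffix, slices off the leading block, and recurses on the rest with only the comment flag carried over.
import Mathlib
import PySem

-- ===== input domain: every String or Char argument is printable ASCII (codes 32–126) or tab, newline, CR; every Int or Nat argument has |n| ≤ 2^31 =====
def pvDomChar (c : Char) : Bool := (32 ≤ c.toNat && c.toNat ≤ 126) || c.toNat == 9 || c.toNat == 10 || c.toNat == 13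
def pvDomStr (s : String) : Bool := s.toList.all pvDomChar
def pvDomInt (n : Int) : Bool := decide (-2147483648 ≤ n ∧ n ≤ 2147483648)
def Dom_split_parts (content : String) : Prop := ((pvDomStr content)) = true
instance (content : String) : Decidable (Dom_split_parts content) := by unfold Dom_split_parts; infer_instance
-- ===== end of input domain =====

-- B replaces A's single stateful scan (global start index, parts list accumulated over the whole file) by a
-- recursive splitter: find the first cut in the remaining suffix, slice off the leading block, recurse on the
-- rest carrying only the comment flag. Alternative decomposition, same asymptotic cost.

-- ===== PORT A =====
def split_parts (content : String) : List String :=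
  let lines := PySem.Str.splitlines content
  let st :=
    (PySem.List.enumerate lines).foldl
      (fun (acc : List String × Int × Bool) (p : Int × String) =>
        let parts := acc.1
        let start := acc.2.1
        let isAnn := acc.2.2
        let i := p.1
        let line := p.2
        let isAnn := if PySem.Str.startswith line "/*" then true else isAnn
        let isAnn := if PySem.Str.endswith line "*/" then false else isAnn
        if (PySem.Str.strip line == "") && !isAnn
            && (decide (start < i)
                && (PySem.Str.endswith (PySem.List.pyGetD lines (i - 1) "") ";"
                    || PySem.Str.endswith (PySem.List.pyGetD lines (i - 1) "") "*/"))
            && (decide ((lines.length : Int) ≤ i + 1)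
                || !PySem.Str.startswith (PySem.List.pyGetD lines (i + 1) "") " ")
        then (parts ++ [PySem.Str.join "\n" (PySem.List.slice lines (some start) (some i))], i + 1, isAnn)
        else (parts, start, isAnn))
      ([], 0, false)
  let parts := st.1 ++ [PySem.Str.join "\n" (PySem.List.slice lines (some st.2.1) none)]
  (parts.filter (fun p => !(PySem.Str.strip p == ""))).map PySem.Str.strip

-- ===== PORT B =====
-- B's inner `for i, line in enumerate(seg)` with early return: scan the enumerated suffix for the first
-- local cut, returning its index and the comment flag after that line's toggles.
def pvBlocksFind (seg : List String) : List (Int × String) → Bool → Option (Int × Bool)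
  | [], _ => none
  | (i, line) :: rest, flag =>
    let flag := if PySem.Str.startswith line "/*" then true else flag
    let flag := if PySem.Str.endswith line "*/" then false else flag
    if decide (0 < i) && (PySem.Str.strip line == "") && !flag
        && (PySem.Str.endswith (PySem.List.pyGetD seg (i - 1) "") ";"
            || PySem.Str.endswith (PySem.List.pyGetD seg (i - 1) "") "*/")
        && (decide ((seg.length : Int) ≤ i + 1)
            || !PySem.Str.startswith (PySem.List.pyGetD seg (i + 1) "") " ")
    then some (i, flag)
    else pvBlocksFind seg rest flag

-- the per-line comment-flag update (both per-line toggles applied, in the Python order)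
def pvFlagStep (f : Bool) (line : String) : Bool :=
  if PySem.Str.endswith line "*/" then false
  else if PySem.Str.startswith line "/*" then true else f

-- B's split condition at local index j of the suffix seg
def pvCondL (seg : List String) (j : Int) (line : String) (f : Bool) : Bool :=
  decide (0 < j) && (PySem.Str.strip line == "") && !f
    && (PySem.Str.endswith (PySem.List.pyGetD seg (j - 1) "") ";"
        || PySem.Str.endswith (PySem.List.pyGetD seg (j - 1) "") "*/")
    && (decide ((seg.length : Int) ≤ j + 1)
        || !PySem.Str.startswith (PySem.List.pyGetD seg (j + 1) "") " ")

-- the cons step of the scan, with its pieces named (proof: definitional)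
theorem pvBlocksFind_cons (seg : List String) (j : Int) (line : String)
    (rest : List (Int × String)) (f : Bool) :
    pvBlocksFind seg ((j, line) :: rest) f
      = if pvCondL seg j line (pvFlagStep f line)
        then some (j, pvFlagStep f line)
        else pvBlocksFind seg rest (pvFlagStep f line) := rfl

-- termination fact the recursive splitter cites: a found cut index is a positive in-range position
theorem pvFind_some_bounds (seg : List String) :
    ∀ (l : List (Int × String)) (f : Bool) (i : Int) (f' : Bool),
    pvBlocksFind seg l f = some (i, f') →
    0 < i ∧ ∃ x, (i, x) ∈ l := by
  intro l
  induction l with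
  | nil => intro f i f' h; simp [pvBlocksFind] at h
  | cons p rest ih =>
      intro f i f' h
      obtain ⟨j, line⟩ := p
      rw [pvBlocksFind_cons] at h
      by_cases hc : pvCondL seg j line (pvFlagStep f line) = true
      · rw [if_pos hc] at h
        have hji : j = i := congrArg Prod.fst (Option.some.inj h)
        subst hji
        refine ⟨?_, line, by simp⟩
        unfold pvCondL at hc
        simp only [Bool.and_eq_true, decide_eq_true_eq] at hc
        exact hc.1.1.1.1
      · rw [if_neg hc] at h
        obtain ⟨hi, x, hx⟩ := ih _ _ _ h
        exact ⟨hi, x, by simp [hx]⟩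

theorem pvFind_some_lt (seg : List String) (f : Bool) (i : Int) (f' : Bool)
    (h : pvBlocksFind seg (PySem.List.enumerate seg 0) f = some (i, f')) :
    0 < i ∧ i < (seg.length : Int) := by
  obtain ⟨hpos, x, hx⟩ := pvFind_some_bounds seg _ f i f' h
  refine ⟨hpos, ?_⟩
  obtain ⟨k, hk, hik⟩ := (PySem.List.mem_enumerate_iff _ _ _).mp hx
  have : i = (k : Int) := by simpa using congrArg Prod.fst hik
  omega

-- B's recursive splitter: peel off the leading block at the first cut and recurse on the rest
def pvBlocks (seg : List String) (flag : Bool) : List String :=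
  match h : pvBlocksFind seg (PySem.List.enumerate seg 0) flag with
  | some (i, flag') =>
      PySem.Str.join "\n" (PySem.List.slice seg none (some i))
        :: pvBlocks (PySem.List.slice seg (some (i + 1)) none) flag'
  | none => [PySem.Str.join "\n" seg]
termination_by seg.length
decreasing_by
  obtain ⟨h0, hlt⟩ := pvFind_some_lt seg flag i flag' h
  rw [PySem.List.slice_from _ (by omega : (0:Int) ≤ i + 1)]
  simp only [List.length_drop]
  omega

def split_parts_alt (content : String) : List String :=
  ((pvBlocks (PySem.Str.splitlines content) false).filter
      (fun p => !(PySem.Str.strip p == ""))).map PySem.Str.strip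

-- ===== PRECONDITION & SPEC =====
def Spec_split_parts (content : String) (out : List String) : Prop := out = split_parts_alt content
instance (content : String) (out : List String) : Decidable (Spec_split_parts content out) := by unfold Spec_split_parts; infer_instance

-- ===== CLAIM (what is proved, stated in full; the proofs are below) =====
def Claim_equal_split_parts : Prop := ∀ (content : String), Dom_split_parts content → Spec_split_parts content (split_parts content)

-- ===== LEMMAS AND PROOFS =====

-- A's split condition at global index i with segment start `start`
def pvCond (lines : List String) (start i : Int) (line : String) (f : Bool) : Bool :=
  (PySem.Str.strip line == "") && !f
    && (decide (start < i)
        && (PySem.Str.endswith (PySem.List.pyGetD lines (i - 1) "") ";"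
            || PySem.Str.endswith (PySem.List.pyGetD lines (i - 1) "") "*/"))
    && (decide ((lines.length : Int) ≤ i + 1)
        || !PySem.Str.startswith (PySem.List.pyGetD lines (i + 1) "") " ")

-- named form of A's loop body (definitionally equal to the lambda in the port)
def pvAStep (lines : List String) (acc : List String × Int × Bool) (p : Int × String) :
    List String × Int × Bool :=
  if pvCond lines acc.2.1 p.1 p.2 (pvFlagStep acc.2.2 p.2)
  then (acc.1 ++ [PySem.Str.join "\n" (PySem.List.slice lines (some acc.2.1) (some p.1))],
        p.1 + 1, pvFlagStep acc.2.2 p.2)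
  else (acc.1, acc.2.1, pvFlagStep acc.2.2 p.2)

-- reference cut list: the split indices with the threaded flag (A's semantics, start fixed between cuts)
def pvCutsGo (lines : List String) : List String → Int → Int → Bool → List Int
  | [], _, _, _ => []
  | x :: rest, i, start, f =>
    if pvCond lines start i x (pvFlagStep f x)
    then i :: pvCutsGo lines rest (i + 1) (i + 1) (pvFlagStep f x)
    else pvCutsGo lines rest (i + 1) start (pvFlagStep f x)

def pvSegsFrom (lines : List String) : Int → List Int → List String
  | _, [] => []
  | start, c :: cs =>
    PySem.Str.join "\n" (PySem.List.slice lines (some start) (some c)) :: pvSegsFrom lines (c + 1) cs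

def pvLastStart : Int → List Int → Int
  | start, [] => start
  | _, c :: cs => pvLastStart (c + 1) cs

-- A's port, with its loop body named (proof: definitional)
theorem pvA_bridge (content : String) :
    split_parts content =
      (let lines := PySem.Str.splitlines content
       let st := (PySem.List.enumerate lines).foldl (pvAStep lines) ([], 0, false)
       let parts := st.1 ++ [PySem.Str.join "\n" (PySem.List.slice lines (some st.2.1) none)]
       (parts.filter (fun p => !(PySem.Str.strip p == ""))).map PySem.Str.strip) := rfl

-- A's loop computes the reference cut list's segments, the last start, and the final flag
theorem pvA_loop (lines : List String) (rest : List String) :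
    ∀ (pre : List String) (i : Int) (parts : List String) (start : Int),
    lines = pre ++ rest → i = (pre.length : Int) →
    (PySem.List.enumerate rest i).foldl (pvAStep lines) (parts, start, pre.foldl pvFlagStep false)
    = (parts ++ pvSegsFrom lines start (pvCutsGo lines rest i start (pre.foldl pvFlagStep false)),
       pvLastStart start (pvCutsGo lines rest i start (pre.foldl pvFlagStep false)),
       lines.foldl pvFlagStep false) := by
  induction rest with
  | nil =>
      intro pre i parts start h hi
      simp [PySem.List.enumerate_nil, pvCutsGo, pvSegsFrom, pvLastStart, h]
  | cons x rest ih =>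
      intro pre i parts start h hi
      rw [PySem.List.enumerate_cons, List.foldl_cons]
      have hpre : lines = (pre ++ [x]) ++ rest := by simp [h]
      have hlen : i + 1 = (((pre ++ [x]).length : Nat) : Int) := by simp [hi]
      have hfold : (pre ++ [x]).foldl pvFlagStep false = pvFlagStep (pre.foldl pvFlagStep false) x := by
        simp
      by_cases hc : pvCond lines start i x (pvFlagStep (pre.foldl pvFlagStep false) x)
      · have hstep : pvAStep lines (parts, start, pre.foldl pvFlagStep false) (i, x)
            = (parts ++ [PySem.Str.join "\n" (PySem.List.slice lines (some start) (some i))],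
               i + 1, pvFlagStep (pre.foldl pvFlagStep false) x) := by
          simp [pvAStep, hc]
        rw [hstep]
        have := ih (pre ++ [x]) (i + 1)
            (parts ++ [PySem.Str.join "\n" (PySem.List.slice lines (some start) (some i))])
            (i + 1) hpre hlen
        rw [hfold] at this
        rw [this]
        simp [pvCutsGo, hc, pvSegsFrom, pvLastStart]
      · have hstep : pvAStep lines (parts, start, pre.foldl pvFlagStep false) (i, x)
            = (parts, start, pvFlagStep (pre.foldl pvFlagStep false) x) := by
          simp [pvAStep, hc]
        rw [hstep]
        have := ih (pre ++ [x]) (i + 1) parts start hpre hlen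
        rw [hfold] at this
        rw [this]
        simp [pvCutsGo, hc]

-- indexing a suffix with a default: local index k of lines.drop s is global index s + k
theorem pvGetD_drop (lines : List String) (s k : Nat) (d : String) :
    PySem.List.pyGetD (lines.drop s) ((k : Nat) : Int) d
      = PySem.List.pyGetD lines (((s + k : Nat)) : Int) d := by
  rw [PySem.List.pyGetD_natCast, PySem.List.pyGetD_natCast]
  simp [List.getD_eq_getElem?_getD, List.getElem?_drop]

-- B's local condition on the suffix equals A's global condition
theorem pvCond_local (lines : List String) (s k : Nat) (line : String) (f : Bool)
    (hk : k < (lines.drop s).length) :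
    pvCondL (lines.drop s) ((k : Nat) : Int) line f
      = pvCond lines ((s : Nat) : Int) (((s : Nat) : Int) + ((k : Nat) : Int)) line f := by
  have hs : s < lines.length := by simp at hk; omega
  unfold pvCondL pvCond
  have hlen : (decide ((((lines.drop s).length : Nat) : Int) ≤ ((k : Nat) : Int) + 1))
      = (decide (((lines.length : Nat) : Int) ≤ ((s : Nat) : Int) + ((k : Nat) : Int) + 1)) := by
    simp only [decide_eq_decide, List.length_drop]
    push_cast [Nat.cast_sub (le_of_lt hs)]
    omega
  have hnext : PySem.List.pyGetD (lines.drop s) (((k : Nat) : Int) + 1) ""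
      = PySem.List.pyGetD lines (((s : Nat) : Int) + ((k : Nat) : Int) + 1) "" := by
    have h1 : (((k : Nat) : Int) + 1) = (((k + 1 : Nat)) : Int) := by push_cast; ring
    have h2 : (((s : Nat) : Int) + ((k : Nat) : Int) + 1) = (((s + (k + 1) : Nat)) : Int) := by
      push_cast; ring
    rw [h1, h2, pvGetD_drop]
  have hgt : (decide ((0 : Int) < ((k : Nat) : Int)))
      = (decide (((s : Nat) : Int) < ((s : Nat) : Int) + ((k : Nat) : Int))) := by
    simp only [decide_eq_decide]; omega
  rw [hlen, hnext, hgt]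
  rcases Nat.eq_zero_or_pos k with rfl | hkpos
  · simp
  · have hprev : PySem.List.pyGetD (lines.drop s) (((k : Nat) : Int) - 1) ""
        = PySem.List.pyGetD lines (((s : Nat) : Int) + ((k : Nat) : Int) - 1) "" := by
      have h1 : (((k : Nat) : Int) - 1) = (((k - 1 : Nat)) : Int) := by
        push_cast [Nat.cast_sub hkpos]; ring
      have h2 : (((s : Nat) : Int) + ((k : Nat) : Int) - 1) = (((s + (k - 1) : Nat)) : Int) := by
        push_cast [Nat.cast_sub hkpos]; ring
      rw [h1, h2, pvGetD_drop]
    rw [hprev]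
    generalize (PySem.Str.strip line == "") = A
    generalize (!f) = B
    generalize (decide (((s : Nat) : Int) < ((s : Nat) : Int) + ((k : Nat) : Int))) = C
    generalize (PySem.Str.endswith (PySem.List.pyGetD lines (((s : Nat) : Int) + ((k : Nat) : Int) - 1) "") ";"
        || PySem.Str.endswith (PySem.List.pyGetD lines (((s : Nat) : Int) + ((k : Nat) : Int) - 1) "") "*/") = D
    generalize (decide (((lines.length : Nat) : Int) ≤ ((s : Nat) : Int) + ((k : Nat) : Int) + 1)
        || !PySem.Str.startswith (PySem.List.pyGetD lines (((s : Nat) : Int) + ((k : Nat) : Int) + 1) "") " ") = E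
    cases A <;> cases B <;> cases C <;> cases D <;> cases E <;> rfl

-- the find scan over the suffix tail, against the reference cut scan
theorem pvFind_cuts (lines : List String) (s : Nat) :
    ∀ (rest : List String) (j : Nat) (f : Bool), rest = (lines.drop s).drop j →
    (∀ _ : pvBlocksFind (lines.drop s) (PySem.List.enumerate rest ((j : Nat) : Int)) f = none,
        pvCutsGo lines rest (((s + j : Nat)) : Int) ((s : Nat) : Int) f = []) ∧
    (∀ (i : Int) (f' : Bool),
        pvBlocksFind (lines.drop s) (PySem.List.enumerate rest ((j : Nat) : Int)) f = some (i, f') →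
        ∃ k : Nat, i = ((k : Nat) : Int) ∧ j ≤ k ∧ k < (lines.drop s).length ∧ 0 < k ∧
          pvCutsGo lines rest (((s + j : Nat)) : Int) ((s : Nat) : Int) f
            = (((s + k : Nat)) : Int)
              :: pvCutsGo lines (lines.drop (s + k + 1)) (((s + k + 1 : Nat)) : Int)
                   (((s + k + 1 : Nat)) : Int) f') := by
  intro rest
  induction rest with
  | nil =>
      intro j f _
      constructor
      · intro _; rfl
      · intro i f' h; simp [PySem.List.enumerate_nil, pvBlocksFind] at h
  | cons x rest ih =>
      intro j f hrest
      have hj : j < (lines.drop s).length := by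
        by_contra hge
        rw [List.drop_eq_nil_of_le (by omega)] at hrest
        exact List.cons_ne_nil x rest (hrest.symm ▸ rfl)
      have hx : (lines.drop s).drop j = x :: rest := hrest.symm
      have hrest' : rest = (lines.drop s).drop (j + 1) := by
        have := congrArg List.tail hx
        simpa [List.tail_drop] using this.symm
      have hcond : pvCondL (lines.drop s) ((j : Nat) : Int) x (pvFlagStep f x)
          = pvCond lines ((s : Nat) : Int) (((s : Nat) : Int) + ((j : Nat) : Int)) x (pvFlagStep f x) :=
        pvCond_local lines s j x (pvFlagStep f x) hj
      have hcast : (((s + j : Nat)) : Int) = ((s : Nat) : Int) + ((j : Nat) : Int) := by push_cast; ring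
      have hj1 : ((j : Nat) : Int) + 1 = (((j + 1 : Nat)) : Int) := by push_cast; ring
      have hcast2 : (((s + j : Nat)) : Int) + 1 = (((s + (j + 1) : Nat)) : Int) := by push_cast; ring
      constructor
      · intro hnone
        rw [PySem.List.enumerate_cons, pvBlocksFind_cons, hcond] at hnone
        by_cases hc : pvCond lines ((s : Nat) : Int) (((s : Nat) : Int) + ((j : Nat) : Int)) x (pvFlagStep f x)
        · rw [if_pos hc] at hnone; exact absurd hnone (by simp)
        · rw [if_neg hc, hj1] at hnone
          have := (ih (j + 1) (pvFlagStep f x) hrest').1 hnone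
          simp only [pvCutsGo]
          rw [hcast, if_neg hc, ← hcast, hcast2]
          exact this
      · intro i f' hsome
        rw [PySem.List.enumerate_cons, pvBlocksFind_cons, hcond] at hsome
        by_cases hc : pvCond lines ((s : Nat) : Int) (((s : Nat) : Int) + ((j : Nat) : Int)) x (pvFlagStep f x)
        · rw [if_pos hc] at hsome
          have h1 : ((j : Nat) : Int) = i := congrArg Prod.fst (Option.some.inj hsome)
          have h2 : pvFlagStep f x = f' := congrArg Prod.snd (Option.some.inj hsome)
          have hjpos : 0 < j := by
            by_contra hz
            have hj0 : j = 0 := by omega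
            subst hj0
            simp [pvCond] at hc
          refine ⟨j, h1.symm, le_refl j, hj, hjpos, ?_⟩
          simp only [pvCutsGo]
          rw [hcast, if_pos hc, ← h2]
          have hd : rest = lines.drop (s + j + 1) := by
            rw [hrest', List.drop_drop]
            all_goals congr 1
          have hcast3 : ((s : Nat) : Int) + ((j : Nat) : Int) + 1 = (((s + j + 1 : Nat)) : Int) := by
            push_cast; ring
          rw [hd, hcast3, ← hcast]
        · rw [if_neg hc, hj1] at hsome
          obtain ⟨k, hik, hjk, hkl, hkpos, hcut⟩ := (ih (j + 1) (pvFlagStep f x) hrest').2 i f' hsome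
          refine ⟨k, hik, by omega, hkl, hkpos, ?_⟩
          simp only [pvCutsGo]
          rw [hcast, if_neg hc, ← hcast, hcast2]
          exact hcut

-- B's recursive splitter produces exactly the reference segments plus the trailing piece
theorem pvBlocks_eq (lines : List String) :
    ∀ (n : Nat) (s : Nat) (f : Bool), (lines.drop s).length ≤ n →
    pvBlocks (lines.drop s) f
      = pvSegsFrom lines ((s : Nat) : Int)
          (pvCutsGo lines (lines.drop s) ((s : Nat) : Int) ((s : Nat) : Int) f)
        ++ [PySem.Str.join "\n"
             (PySem.List.slice lines
               (some (pvLastStart ((s : Nat) : Int)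
                 (pvCutsGo lines (lines.drop s) ((s : Nat) : Int) ((s : Nat) : Int) f))) none)] := by
  intro n
  induction n with
  | zero =>
      intro s f hn
      rw [pvBlocks]
      rcases hfind : pvBlocksFind (lines.drop s) (PySem.List.enumerate (lines.drop s) 0) f with _ | ⟨i, f'⟩
      · have hs0 : (((s + 0 : Nat)) : Int) = ((s : Nat) : Int) := by push_cast; ring
        have h0 := (pvFind_cuts lines s (lines.drop s) 0 f (by simp)).1
        rw [hs0] at h0
        have hcuts := h0 (by simpa using hfind)
        rw [hcuts]
        simp [pvSegsFrom, pvLastStart, PySem.List.slice_from _ (Int.natCast_nonneg s)]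
      · exfalso
        obtain ⟨hpos, hlt⟩ := pvFind_some_lt _ _ _ _ hfind
        omega
  | succ n ihn =>
      intro s f hn
      rw [pvBlocks]
      rcases hfind : pvBlocksFind (lines.drop s) (PySem.List.enumerate (lines.drop s) 0) f with _ | ⟨i, f'⟩
      · have hs0 : (((s + 0 : Nat)) : Int) = ((s : Nat) : Int) := by push_cast; ring
        have h0 := (pvFind_cuts lines s (lines.drop s) 0 f (by simp)).1
        rw [hs0] at h0
        have hcuts := h0 (by simpa using hfind)
        rw [hcuts]
        simp [pvSegsFrom, pvLastStart, PySem.List.slice_from _ (Int.natCast_nonneg s)]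
      · have h0 := (pvFind_cuts lines s (lines.drop s) 0 f (by simp)).2 i f' (by simpa using hfind)
        obtain ⟨k, rfl, _, hkl, hkpos, hcut⟩ := h0
        have hs0 : (((s + 0 : Nat)) : Int) = ((s : Nat) : Int) := by push_cast; ring
        rw [hs0] at hcut
        simp only []
        rw [hcut]
        have hdrop : PySem.List.slice (lines.drop s) (some (((k : Nat) : Int) + 1)) none
            = lines.drop (s + k + 1) := by
          have h1 : ((k : Nat) : Int) + 1 = (((k + 1 : Nat)) : Int) := by push_cast; ring
          rw [h1, PySem.List.slice_from_natCast, List.drop_drop]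
          all_goals congr 1
        have hrec := ihn (s + k + 1) f' (by
          simp only [List.length_drop] at hkl hn ⊢
          omega)
        rw [hdrop, hrec]
        have htake : PySem.Str.join "\n" (PySem.List.slice (lines.drop s) none (some ((k : Nat) : Int)))
            = PySem.Str.join "\n" (PySem.List.slice lines (some ((s : Nat) : Int)) (some (((s + k : Nat)) : Int))) := by
          congr 1
          rw [PySem.List.slice_to_natCast, PySem.List.slice_natCast]
          congr 1; omega
        simp only [pvSegsFrom, pvLastStart, htake]
        have hcast : (((s + k : Nat)) : Int) + 1 = (((s + k + 1 : Nat)) : Int) := by push_cast; ring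
        rw [hcast]
        simp

-- ===== VERDICT (by name: the statement is the Claim_ definition above) =====
theorem split_parts_spec : Claim_equal_split_parts := by
  intro content _
  unfold Spec_split_parts split_parts_alt
  rw [pvA_bridge]
  have hA := pvA_loop (PySem.Str.splitlines content) (PySem.Str.splitlines content) [] 0 [] 0
      (by simp) (by simp)
  simp only [List.foldl_nil, List.nil_append] at hA
  have hB := pvBlocks_eq (PySem.Str.splitlines content) (PySem.Str.splitlines content).length 0 false
      (by simp)
  simp only [List.drop_zero, Nat.cast_zero] at hB
  simp only [hA, hB]
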